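-- pv_equiv track=rewrite | github.com/stem357/DATASCI-200-Midterm | midterm.py | birthday_count
-- ===== SOURCE A (Python) =====
-- def birthday_count(dates_list):
--     """
--     Returns the total number of birthday pairs in the dates_list.
--     """
--     birthday_counts = {}
--     count = 0
--
--     # Count how many times each birthday occurs
--     for birthday in dates_list:
--         if birthday in birthday_counts:
--             birthday_counts[birthday] += 1
--         else:
--             birthday_counts[birthday] = 1
--
--     # For each birthday, calculate how many pairs can be formed
--     for birthday, occurrences in birthday_counts.items():
--         if occurrences > 1:
--             count += (occurrences * (occurrences - 1)) // 2
--
--     return count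
-- ===== SOURCE B (Python) =====
-- def birthday_count(dates_list):
--     """
--     Returns the total number of birthday pairs in the dates_list.
--     """
--     seen = {}
--     count = 0
--     for birthday in dates_list:
--         count += seen.get(birthday, 0)
--         seen[birthday] = seen.get(birthday, 0) + 1
--     return count
-- ===== Notes on version B (the rewrite author's own statement) =====
-- stated objective: alternative
-- what changed: Replaces the two-phase count-then-combine approach (build a full histogram, then a second pass applying k*(k-1)//2 per key) with a single pass that adds, for each date, the number of previously seen copies to a running total; no combinatorial formula and no second loop over the dict.
import Mathlib
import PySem

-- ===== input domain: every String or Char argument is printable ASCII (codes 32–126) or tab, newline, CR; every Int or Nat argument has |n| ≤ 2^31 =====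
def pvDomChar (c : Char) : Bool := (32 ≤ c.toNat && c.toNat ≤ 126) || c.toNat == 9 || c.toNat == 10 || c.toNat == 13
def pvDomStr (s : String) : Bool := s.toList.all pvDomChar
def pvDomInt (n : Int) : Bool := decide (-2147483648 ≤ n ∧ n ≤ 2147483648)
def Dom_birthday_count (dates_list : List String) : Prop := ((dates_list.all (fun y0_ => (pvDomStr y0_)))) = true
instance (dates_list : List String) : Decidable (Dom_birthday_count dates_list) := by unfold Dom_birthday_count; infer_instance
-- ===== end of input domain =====

-- B replaces A's two-phase histogram + k*(k-1)//2 pass by a single pass adding, for each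
-- date, the number of previously seen copies to a running total (alternative decomposition).


-- ===== PORT A =====
-- first loop's body: if birthday in birthday_counts: +=1 else: =1
def bcStepA (d : PySem.Dict String Int) (b : String) : PySem.Dict String Int :=
  if d.contains b then d.modify b 0 (· + 1) else d.insert b 1

def birthday_count (dates_list : List String) : Int :=
  let birthday_counts := dates_list.foldl bcStepA PySem.Dict.empty
  birthday_counts.items.foldl
    (fun count p => if p.2 > 1 then count + PySem.Int.floordiv (p.2 * (p.2 - 1)) 2 else count) 0

-- ===== PORT B =====
-- single-pass body: count += seen.get(b, 0); seen[b] = seen.get(b, 0) + 1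
def bcStepB (st : Int × PySem.Dict String Int) (b : String) : Int × PySem.Dict String Int :=
  (st.1 + st.2.getD b 0, st.2.insert b (st.2.getD b 0 + 1))

def birthday_count_alt (dates_list : List String) : Int :=
  (dates_list.foldl bcStepB (0, PySem.Dict.empty)).1

-- ===== PRECONDITION & SPEC =====
def Spec_birthday_count (dates_list : List String) (out : Int) : Prop := out = birthday_count_alt dates_list
instance (dates_list : List String) (out : Int) : Decidable (Spec_birthday_count dates_list out) := by unfold Spec_birthday_count; infer_instance

-- ===== CLAIM (what is proved, stated in full; the proofs are below) =====
def Claim_equal_birthday_count : Prop := ∀ (dates_list : List String), Dom_birthday_count dates_list → Spec_birthday_count dates_list (birthday_count dates_list)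

-- ===== LEMMAS AND PROOFS =====

-- pairs contributed by a key with v occurrences
def bcG (v : Int) : Int := if v > 1 then PySem.Int.floordiv (v * (v - 1)) 2 else 0

-- total pairs as A computes them, as a sum over the distinct elements
def bcS (l : List String) : Int :=
  ((PySem.Set.ofList l).map (fun k => bcG ((l.count k : Int)))).sum

-- total pairs as B computes them: Σ over positions of (count among the earlier elements)
def bcT (ys : List String) : List String → Int
  | [] => 0
  | x :: xs => (ys.count x : Int) + bcT (ys ++ [x]) xs

lemma bcStepA_eq : bcStepA = fun d b => d.insert b (d.getD b 0 + 1) := by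
  funext d b
  unfold bcStepA
  by_cases h : d.contains b = true
  · simp [PySem.Dict.modify, h]
  · have h' : d.contains b = false := by simpa using h
    have hget : d.get? b = none := by
      have hc := PySem.Dict.contains_eq_isSome_get? (d := d) (k := b)
      rw [h'] at hc
      exact Option.not_isSome_iff_eq_none.mp (by simp [← hc])
    simp [h', PySem.Dict.getD, hget]

lemma bcG_succ (n : Int) (hn : 0 ≤ n) : bcG (n + 1) = bcG n + n := by
  unfold bcG
  rcases lt_or_ge n 2 with h2 | h2
  · interval_cases n <;> simp [PySem.Int.floordiv]
  · have h1 : n + 1 > 1 := by omega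
    have h0 : n > 1 := by omega
    simp only [if_pos h1, if_pos h0, PySem.Int.floordiv]
    have : (n + 1) * ((n + 1) - 1) = n * (n - 1) + n * 2 := by ring
    rw [this, Int.add_mul_fdiv_right _ _ (by norm_num : (2:Int) ≠ 0)]

lemma bc_sum_map_add (s : List String) (f h : String → Int) :
    (s.map (fun k => f k + h k)).sum = (s.map f).sum + (s.map h).sum := by
  induction s with
  | nil => simp
  | cons a s ih => simp [ih]; ring

lemma bc_sum_ite_zero (s : List String) (x : String) (c : Int) (hx : x ∉ s) :
    (s.map (fun k => if k = x then c else 0)).sum = 0 := by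
  induction s with
  | nil => simp
  | cons a s ih =>
    simp only [List.mem_cons, not_or] at hx
    simp [Ne.symm, hx.1, ih hx.2]

lemma bc_sum_ite (s : List String) (x : String) (c : Int) (hnd : s.Nodup) (hx : x ∈ s) :
    (s.map (fun k => if k = x then c else 0)).sum = c := by
  induction s with
  | nil => simp at hx
  | cons a s ih =>
    rcases List.nodup_cons.mp hnd with ⟨ha, hnd'⟩
    by_cases hax : a = x
    · subst hax
      simp [bc_sum_ite_zero s a c ha]
    · have hxs : x ∈ s := by
        rcases List.mem_cons.mp hx with h | h
        · exact absurd h.symm hax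
        · exact h
      simp [hax, ih hnd' hxs]

lemma bc_ofList_append_singleton (l : List String) (x : String) :
    PySem.Set.ofList (l ++ [x]) = PySem.Set.add (PySem.Set.ofList l) x := by
  rw [PySem.Set.ofList_eq_foldl, PySem.Set.ofList_eq_foldl, List.foldl_append]
  rfl

-- the key combinatorial step: appending one date adds (its earlier count) pairs
lemma bcS_append (l : List String) (x : String) :
    bcS (l ++ [x]) = bcS l + (l.count x : Int) := by
  unfold bcS
  rw [bc_ofList_append_singleton]
  by_cases hx : x ∈ l
  · have hmem : x ∈ PySem.Set.ofList l := (PySem.Set.mem_ofList l x).mpr hx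
    have hadd : PySem.Set.add (PySem.Set.ofList l) x = PySem.Set.ofList l := by
      simp [PySem.Set.add, PySem.Set.contains, hmem]
    rw [hadd]
    have hpt : ((PySem.Set.ofList l : List String)).map
        (fun k => bcG (((l ++ [x]).count k : Int)))
        = ((PySem.Set.ofList l : List String)).map
          (fun k => bcG ((l.count k : Int)) + (if k = x then (l.count x : Int) else 0)) := by
      apply List.map_congr_left
      intro k _
      by_cases hk : k = x
      · subst hk
        have hc : (l ++ [k]).count k = l.count k + 1 := by simp
        rw [hc, if_pos rfl]
        push_cast
        exact bcG_succ _ (by positivity)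
      · have hxk : ¬ x = k := fun h => hk h.symm
        have hc : (l ++ [x]).count k = l.count k := by
          simp [List.count_append, hxk]
        rw [hc, if_neg hk, add_zero]
    rw [hpt, bc_sum_map_add,
        bc_sum_ite _ _ _ (PySem.Set.nodup_ofList l) hmem]
  · have hmem : x ∉ PySem.Set.ofList l := fun h => hx ((PySem.Set.mem_ofList l x).mp h)
    have hadd : PySem.Set.add (PySem.Set.ofList l) x
        = (PySem.Set.ofList l : List String) ++ [x] := by
      simp [PySem.Set.add, PySem.Set.contains, hmem]
    have hcx : l.count x = 0 := List.count_eq_zero.mpr hx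
    rw [hadd, List.map_append, List.sum_append]
    have hpt : ((PySem.Set.ofList l : List String)).map
        (fun k => bcG (((l ++ [x]).count k : Int)))
        = ((PySem.Set.ofList l : List String)).map (fun k => bcG ((l.count k : Int))) := by
      apply List.map_congr_left
      intro k hk
      have hkl : k ∈ l := (PySem.Set.mem_ofList l k).mp hk
      have hkx : ¬ x = k := fun h => hx (h ▸ hkl)
      simp [List.count_append, hkx]
    rw [hpt]
    simp [bcG, hcx]

lemma bcT_eq (xs : List String) : ∀ ys, bcT ys xs = bcS (ys ++ xs) - bcS ys := by
  induction xs with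
  | nil => intro ys; simp [bcT]
  | cons x xs ih =>
    intro ys
    have h1 : ys ++ x :: xs = (ys ++ [x]) ++ xs := by simp
    rw [bcT, ih (ys ++ [x]), h1, bcS_append]
    ring

-- A's result is bcS
lemma birthday_count_eq_bcS (l : List String) : birthday_count l = bcS l := by
  unfold birthday_count
  simp only [bcStepA_eq, PySem.Dict.foldl_insert_getD_add_one_eq_counter]
  rw [PySem.Dict.items_counter]
  have hstep : (fun (count : Int) (p : String × Int) =>
      if p.2 > 1 then count + PySem.Int.floordiv (p.2 * (p.2 - 1)) 2 else count)
      = fun count p => count + bcG p.2 := by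
    funext c p
    unfold bcG
    by_cases h : p.2 > 1 <;> simp [h]
  rw [hstep, PySem.List.foldl_add]
  unfold bcS
  rw [zero_add, List.map_map]
  rfl

-- B's loop characterised: from state (c, counter-of-ys) it adds bcT ys xs
lemma bcB_loop (xs : List String) : ∀ (ys : List String) (c : Int),
    (xs.foldl bcStepB (c, ys.foldl (fun d x => d.insert x (d.getD x 0 + 1)) PySem.Dict.empty)).1
      = c + bcT ys xs := by
  induction xs with
  | nil => intro ys c; simp [bcT]
  | cons x xs ih =>
    intro ys c
    have hc : (ys.foldl (fun d x => d.insert x (d.getD x 0 + 1)) PySem.Dict.empty).getD x 0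
        = (ys.count x : Int) := by
      rw [PySem.Dict.foldl_insert_getD_add_one_eq_counter, PySem.Dict.getD_counter]
    have hnext : bcStepB (c, ys.foldl (fun d x => d.insert x (d.getD x 0 + 1)) PySem.Dict.empty) x
        = (c + (ys.count x : Int),
           (ys ++ [x]).foldl (fun d x => d.insert x (d.getD x 0 + 1)) PySem.Dict.empty) := by
      unfold bcStepB
      rw [List.foldl_append]
      simp [hc]
    rw [List.foldl_cons, hnext, ih (ys ++ [x]), bcT]
    ring

lemma birthday_count_alt_eq (l : List String) : birthday_count_alt l = bcT [] l := by
  unfold birthday_count_alt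
  have := bcB_loop l [] 0
  simpa using this

-- ===== VERDICT (by name: the statement is the Claim_ definition above) =====
theorem birthday_count_spec : Claim_equal_birthday_count := by
  intro l _
  unfold Spec_birthday_count
  rw [birthday_count_eq_bcS, birthday_count_alt_eq, bcT_eq l []]
  simp [bcS]
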